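-- pv_equiv track=rewrite | github.com/liunx/lmms | common.py | triple_notes
-- ===== SOURCE A (Python) =====
-- def triple_notes(note_name, note_len):
--     l = [128, 64, 32, 16, 8, 4]
--     n = [1, 2, 4, 8, 16, 32]
--     notes = []
--     current_len = note_len
--     for _len, _type in zip(l, n):
--         quotient = int(current_len // _len)
--         reminder = int(current_len % _len)
--         if reminder > 0:
--             if quotient > 0:
--                 for i in range(quotient):
--                     notes.append(['trip', f'{note_name}{_type}~'])
--         elif reminder == 0:
--             current_len = 0
--             if quotient > 0:
--                 for i in range(quotient):
--                     notes.append(['trip', f'{note_name}{_type}~'])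
--                 # strip out last ~
--                 notes[-1][-1] = notes[-1][-1].replace('~', '')
--             break
--         current_len = reminder
--     return notes, current_len
-- ===== SOURCE B (Python) =====
-- def triple_notes(note_name, note_len):
--     # Phase 1: compute (type, count) records and the final remainder with divmod.
--     records = []
--     current_len = note_len
--     exact = False
--     for _len, _type in zip([128, 64, 32, 16, 8, 4], [1, 2, 4, 8, 16, 32]):
--         quotient, reminder = divmod(current_len, _len)
--         records.append((_type, quotient if quotient > 0 else 0))
--         if reminder == 0:
--             current_len = 0
--             exact = True
--             break
--         current_len = reminder
--     # Phase 2: flatten the records into the notes list.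
--     notes = []
--     for _type, count in records:
--         for _ in range(count):
--             notes.append(['trip', f'{note_name}{_type}~'])
--     if exact and notes:
--         notes[-1][-1] = notes[-1][-1].replace('~', '')
--     return notes, current_len
-- ===== Notes on version B (the rewrite author's own statement) =====
-- stated objective: alternative
-- what changed: Replaces A's single loop that interleaves divmod with in-place note appending and a break-time strip by a two-phase version: one divmod pass building (type,count) records plus an exact-division flag, then a separate flattening pass that materialises the notes and strips the trailing tie marker once at the end.
import Mathlib
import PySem

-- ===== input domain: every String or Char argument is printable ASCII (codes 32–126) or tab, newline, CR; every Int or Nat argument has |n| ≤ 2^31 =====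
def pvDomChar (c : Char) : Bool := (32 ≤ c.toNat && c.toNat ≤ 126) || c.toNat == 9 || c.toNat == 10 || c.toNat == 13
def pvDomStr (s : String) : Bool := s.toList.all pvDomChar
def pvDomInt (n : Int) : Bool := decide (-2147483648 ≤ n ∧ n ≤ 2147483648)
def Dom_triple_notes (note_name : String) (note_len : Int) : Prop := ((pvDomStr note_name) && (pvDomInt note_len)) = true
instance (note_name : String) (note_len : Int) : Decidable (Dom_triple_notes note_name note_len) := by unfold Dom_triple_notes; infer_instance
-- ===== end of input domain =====

-- B reorganises A's single interleaved loop into two phases: a divmod pass producing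
-- (type,count) records plus an exact-division flag, then a flattening pass; same values.

-- shared row builder: ['trip', f'{note_name}{_type}~']
def pvTripRow (note_name : String) (t : Int) : List String :=
  ["trip", note_name ++ PySem.Int.toStr t ++ "~"]

-- notes[-1][-1] = notes[-1][-1].replace('~','') — hand port, exact for nonempty lists
-- of nonempty rows (the only way both Pythons reach it)
def pvStripRow : List String → List String
  | [] => []
  | [s] => [PySem.Str.replace s "~" ""]
  | s :: rest => s :: pvStripRow rest

def pvStripLast : List (List String) → List (List String)
  | [] => []
  | [r] => [pvStripRow r]
  | r :: rest => r :: pvStripLast rest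

-- ===== PORT A =====
def triple_notes.loop (note_name : String) :
    List (Int × Int) → List (List String) → Int → List (List String) × Int
  | [], notes, current_len => (notes, current_len)
  | (l, t) :: rest, notes, cur =>
    let quotient := PySem.Int.floordiv cur l
    let reminder := PySem.Int.mod cur l
    if 0 < reminder then
      let notes := if 0 < quotient
        then notes ++ (List.range quotient.toNat).map (fun _ => pvTripRow note_name t)
        else notes
      triple_notes.loop note_name rest notes reminder
    else if reminder = 0 then
      let notes := if 0 < quotient
        then pvStripLast (notes ++ (List.range quotient.toNat).map (fun _ => pvTripRow note_name t))
        else notes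
      (notes, 0)
    else
      triple_notes.loop note_name rest notes reminder

def triple_notes (note_name : String) (note_len : Int) : List (List String) × Int :=
  triple_notes.loop note_name
    (List.zip [128, 64, 32, 16, 8, 4] [1, 2, 4, 8, 16, 32]) [] note_len

-- ===== PORT B =====
def triple_notes_alt.records : Int → List (Int × Int) → List (Int × Int) × Bool × Int
  | cur, [] => ([], false, cur)
  | cur, (l, t) :: rest =>
    let q := PySem.Int.floordiv cur l
    let r := PySem.Int.mod cur l
    let c := if 0 < q then q else 0
    if r = 0 then ([(t, c)], true, 0)
    else
      let (recs, ex, fin) := triple_notes_alt.records r rest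
      ((t, c) :: recs, ex, fin)

def triple_notes_alt (note_name : String) (note_len : Int) : List (List String) × Int :=
  let out := triple_notes_alt.records note_len
    (List.zip [128, 64, 32, 16, 8, 4] [1, 2, 4, 8, 16, 32])
  let notes := out.1.foldl
    (fun acc p => acc ++ (List.range p.2.toNat).map (fun _ => pvTripRow note_name p.1)) []
  let notes := if out.2.1 && !notes.isEmpty then pvStripLast notes else notes
  (notes, out.2.2)

-- ===== PRECONDITION & SPEC =====
def Spec_triple_notes (note_name : String) (note_len : Int) (out : List (List String) × Int) : Prop := out = triple_notes_alt note_name note_len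
instance (note_name : String) (note_len : Int) (out : List (List String) × Int) : Decidable (Spec_triple_notes note_name note_len out) := by unfold Spec_triple_notes; infer_instance

-- ===== CLAIM (what is proved, stated in full; the proofs are below) =====
def Claim_equal_triple_notes : Prop := ∀ (note_name : String) (note_len : Int), Dom_triple_notes note_name note_len → Spec_triple_notes note_name note_len (triple_notes note_name note_len)

-- ===== LEMMAS AND PROOFS =====

theorem triple_notes_loop_eq (name : String) :
    ∀ (ps : List (Int × Int)) (notes : List (List String)) (cur : Int),
      (∀ p ∈ ps, (0 : Int) < p.1) → (notes = [] ∨ 0 < cur) →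
      triple_notes.loop name ps notes cur =
        (let out := triple_notes_alt.records cur ps
         let all := notes ++ out.1.flatMap
           (fun p => (List.range p.2.toNat).map (fun _ => pvTripRow name p.1))
         ((if out.2.1 && !all.isEmpty then pvStripLast all else all), out.2.2)) := by
  intro ps
  induction ps with
  | nil =>
    intro notes cur _ _
    simp [triple_notes.loop, triple_notes_alt.records]
  | cons hd tl ih =>
    obtain ⟨l, t⟩ := hd
    intro notes cur hpos hinv
    have hl : (0:Int) < l := hpos (l, t) (by simp)
    have hr0 : 0 ≤ PySem.Int.mod cur l := PySem.Int.mod_nonneg cur hl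
    simp only [triple_notes.loop, triple_notes_alt.records]
    by_cases hr : PySem.Int.mod cur l = 0
    · -- break branch: reminder == 0
      have hnotpos : ¬ 0 < PySem.Int.mod cur l := by omega
      by_cases hq1 : 0 < PySem.Int.floordiv cur l
      · have hne : ((List.range (PySem.Int.floordiv cur l).toNat).map
            (fun _ => pvTripRow name t)) ≠ [] := by
          simp only [ne_eq, List.map_eq_nil_iff, List.range_eq_nil]
          omega
        simp [hr, hq1]
      · -- quotient ≤ 0 at the break level forces an empty accumulator
        have hnotes : notes = [] := by
          rcases hinv with h | hcur
          · exact h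
          · exfalso
            have hdvd : l ∣ cur := (PySem.Int.mod_eq_zero_iff_dvd cur l).mp hr
            have hle : l ≤ cur := Int.le_of_dvd hcur hdvd
            have h1 : (1:Int) ≤ PySem.Int.floordiv cur l :=
              (PySem.Int.le_floordiv_iff_mul_le hl).mpr (by omega)
            omega
        subst hnotes
        simp [hr, hq1]
    · -- continue branch: reminder > 0
      have hrpos : 0 < PySem.Int.mod cur l := lt_of_le_of_ne hr0 (Ne.symm hr)
      have ihr := fun notes => ih notes (PySem.Int.mod cur l)
        (fun p hp => hpos p (List.mem_cons_of_mem _ hp)) (Or.inr hrpos)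
      by_cases hq1 : 0 < PySem.Int.floordiv cur l
      · simp only [if_pos hrpos, if_pos hq1, if_neg hr]
        rw [ihr _]
        simp only [List.flatMap_cons, List.append_assoc]
      · simp only [if_pos hrpos, if_neg hq1, if_neg hr]
        rw [ihr _]
        simp only [List.flatMap_cons, Int.toNat_zero, List.range_zero, List.map_nil, List.nil_append]

-- ===== VERDICT (by name: the statement is the Claim_ definition above) =====
theorem triple_notes_spec : Claim_equal_triple_notes := by
  intro name n _
  unfold Spec_triple_notes triple_notes triple_notes_alt
  rw [triple_notes_loop_eq name _ [] n (by decide) (Or.inl rfl)]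
  simp only [PySem.List.foldl_append_eq_flatMap, List.nil_append]
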